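-- pv_equiv track=rewrite | github.com/NingmengLemon/MiraiChan | src/lemony_utils/images.py | calc_bbox
-- ===== SOURCE A (Python) =====
-- _BboxT = tuple[int, int, int, int]
--
-- def calc_bbox(actual_bbox: _BboxT, expected_bbox: _BboxT, sticky: str | None):
--     """根据给定的 小bbox (`actual_bbox`) 和 大bbox (`expected_bbox`) 和 停靠方向
--     计算小bbox左上角点的坐标"""
--     aw, ah = actual_bbox[2] - actual_bbox[0], actual_bbox[3] - actual_bbox[1]
--     ew, eh = expected_bbox[2] - expected_bbox[0], expected_bbox[3] - expected_bbox[1]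
--     x, y = (
--         expected_bbox[0] + (ew - aw) / 2,
--         expected_bbox[1] + (eh - ah) / 2,
--     )  # 初始居中
--     if sticky:
--         for s in sticky:
--             match s:
--                 case "w":
--                     x = expected_bbox[0]
--                 case "s":
--                     y = expected_bbox[1] + eh - ah
--                 case "e":
--                     x = expected_bbox[0] + ew - aw
--                 case "n":
--                     y = expected_bbox[1]
--     return int(x), int(y)
-- ===== SOURCE B (Python) =====
-- def calc_bbox(actual_bbox, expected_bbox, sticky):
--     aw, ah = actual_bbox[2] - actual_bbox[0], actual_bbox[3] - actual_bbox[1]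
--     ew, eh = expected_bbox[2] - expected_bbox[0], expected_bbox[3] - expected_bbox[1]
--     x = expected_bbox[0] + (ew - aw) / 2
--     y = expected_bbox[1] + (eh - ah) / 2
--     if sticky:
--         cx = next((c for c in reversed(sticky) if c in "we"), None)
--         cy = next((c for c in reversed(sticky) if c in "ns"), None)
--         if cx == "w":
--             x = expected_bbox[0]
--         elif cx == "e":
--             x = expected_bbox[0] + ew - aw
--         if cy == "n":
--             y = expected_bbox[1]
--         elif cy == "s":
--             y = expected_bbox[1] + eh - ah
--     return int(x), int(y)
-- ===== Notes on version B (the rewrite author's own statement) =====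
-- stated objective: simpler
-- what changed: Replaces A's single order-dependent fold over the sticky string (mutating x and y per character) by two independent per-axis scans: the last 'w'/'e' character determines x and the last 'n'/'s' character determines y (first match in the reversed string), falling back to the centered value; the reversed scans short-circuit at the first hit instead of dispatching on every character.
import Mathlib
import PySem

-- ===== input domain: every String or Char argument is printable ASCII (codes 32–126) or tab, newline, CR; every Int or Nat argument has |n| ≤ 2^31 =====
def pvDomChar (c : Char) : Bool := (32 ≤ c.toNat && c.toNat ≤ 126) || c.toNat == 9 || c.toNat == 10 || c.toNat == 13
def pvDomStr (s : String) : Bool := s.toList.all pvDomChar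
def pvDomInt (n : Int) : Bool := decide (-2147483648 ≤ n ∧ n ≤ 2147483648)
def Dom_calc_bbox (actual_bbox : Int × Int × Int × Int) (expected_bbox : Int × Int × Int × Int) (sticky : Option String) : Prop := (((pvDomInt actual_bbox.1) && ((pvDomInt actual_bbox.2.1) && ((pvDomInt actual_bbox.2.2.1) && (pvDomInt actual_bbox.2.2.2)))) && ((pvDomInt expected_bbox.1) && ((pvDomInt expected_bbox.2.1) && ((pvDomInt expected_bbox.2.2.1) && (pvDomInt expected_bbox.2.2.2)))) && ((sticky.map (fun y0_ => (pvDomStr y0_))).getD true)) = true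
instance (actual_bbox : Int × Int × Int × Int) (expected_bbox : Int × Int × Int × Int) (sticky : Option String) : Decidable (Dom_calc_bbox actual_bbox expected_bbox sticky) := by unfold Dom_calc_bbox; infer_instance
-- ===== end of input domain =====

-- B replaces A's single order-dependent fold over `sticky` by two independent per-axis
-- last-occurrence scans (objective: simpler decomposition; same cost).
-- Python's float arithmetic here (`n + m / 2` with |n|,|m| ≤ 2^33) is exact on half-integers
-- well inside double precision, so it is modelled exactly by Rat; `int()` truncates toward zero.

-- int(q) for a Python float holding the exact rational q: truncation toward zero.
def pyIntOfRat (q : Rat) : Int := q.num.tdiv q.den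

-- ===== PORT A =====
def calc_bbox (actual_bbox : Int × Int × Int × Int) (expected_bbox : Int × Int × Int × Int) (sticky : Option String) : Int × Int :=
  let aw := actual_bbox.2.2.1 - actual_bbox.1
  let ah := actual_bbox.2.2.2 - actual_bbox.2.1
  let ew := expected_bbox.2.2.1 - expected_bbox.1
  let eh := expected_bbox.2.2.2 - expected_bbox.2.1
  let x : Rat := (expected_bbox.1 : Rat) + ((ew - aw : Int) : Rat) / 2
  let y : Rat := (expected_bbox.2.1 : Rat) + ((eh - ah : Int) : Rat) / 2
  let xy : Rat × Rat :=
    match sticky with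
    | none => (x, y)
    | some s =>
      -- `if sticky:` — a None or empty string skips the loop (empty fold is identity anyway)
      s.toList.foldl (fun (xy : Rat × Rat) c =>
        if c = 'w' then (((expected_bbox.1 : Int) : Rat), xy.2)
        else if c = 's' then (xy.1, ((expected_bbox.2.1 + eh - ah : Int) : Rat))
        else if c = 'e' then (((expected_bbox.1 + ew - aw : Int) : Rat), xy.2)
        else if c = 'n' then (xy.1, ((expected_bbox.2.1 : Int) : Rat))
        else xy) (x, y)
  (pyIntOfRat xy.1, pyIntOfRat xy.2)

-- ===== PORT B =====
def calc_bbox_alt (actual_bbox : Int × Int × Int × Int) (expected_bbox : Int × Int × Int × Int) (sticky : Option String) : Int × Int :=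
  let aw := actual_bbox.2.2.1 - actual_bbox.1
  let ah := actual_bbox.2.2.2 - actual_bbox.2.1
  let ew := expected_bbox.2.2.1 - expected_bbox.1
  let eh := expected_bbox.2.2.2 - expected_bbox.2.1
  let x : Rat := (expected_bbox.1 : Rat) + ((ew - aw : Int) : Rat) / 2
  let y : Rat := (expected_bbox.2.1 : Rat) + ((eh - ah : Int) : Rat) / 2
  match sticky with
  | none => (pyIntOfRat x, pyIntOfRat y)
  | some s =>
    -- last character of each axis class wins: first match in the reversed string
    let cx := s.toList.reverse.find? (fun c => c == 'w' || c == 'e')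
    let cy := s.toList.reverse.find? (fun c => c == 'n' || c == 's')
    let x := if cx = some 'w' then ((expected_bbox.1 : Int) : Rat)
             else if cx = some 'e' then ((expected_bbox.1 + ew - aw : Int) : Rat)
             else x
    let y := if cy = some 'n' then ((expected_bbox.2.1 : Int) : Rat)
             else if cy = some 's' then ((expected_bbox.2.1 + eh - ah : Int) : Rat)
             else y
    (pyIntOfRat x, pyIntOfRat y)

-- ===== PRECONDITION & SPEC =====
def Spec_calc_bbox (actual_bbox : Int × Int × Int × Int) (expected_bbox : Int × Int × Int × Int) (sticky : Option String) (out : Int × Int) : Prop := out = calc_bbox_alt actual_bbox expected_bbox sticky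
instance (actual_bbox : Int × Int × Int × Int) (expected_bbox : Int × Int × Int × Int) (sticky : Option String) (out : Int × Int) : Decidable (Spec_calc_bbox actual_bbox expected_bbox sticky out) := by unfold Spec_calc_bbox; infer_instance

-- ===== CLAIM (what is proved, stated in full; the proofs are below) =====
def Claim_equal_calc_bbox : Prop := ∀ (actual_bbox : Int × Int × Int × Int) (expected_bbox : Int × Int × Int × Int) (sticky : Option String), Dom_calc_bbox actual_bbox expected_bbox sticky → Spec_calc_bbox actual_bbox expected_bbox sticky (calc_bbox actual_bbox expected_bbox sticky)

-- ===== LEMMAS AND PROOFS =====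

lemma fold_axes (xw xe yn ys : Rat) :
  ∀ (cs : List Char) (x y : Rat),
    cs.foldl (fun (xy : Rat × Rat) c =>
      if c = 'w' then (xw, xy.2)
      else if c = 's' then (xy.1, ys)
      else if c = 'e' then (xe, xy.2)
      else if c = 'n' then (xy.1, yn)
      else xy) (x, y)
    = ((match cs.reverse.find? (fun c => c == 'w' || c == 'e') with
        | some c => if c = 'w' then xw else xe
        | none => x),
       (match cs.reverse.find? (fun c => c == 'n' || c == 's') with
        | some c => if c = 'n' then yn else ys
        | none => y)) := by
  intro cs
  induction cs using List.reverseRecOn with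
  | nil => intro x y; simp
  | append_singleton cs c ih =>
    intro x y
    rw [List.foldl_append, ih, List.reverse_append]
    simp only [List.reverse_singleton, List.singleton_append, List.find?_cons, List.foldl_cons, List.foldl_nil]
    by_cases hw : c = 'w'
    · subst hw; simp
    · by_cases hs : c = 's'
      · subst hs; simp
      · by_cases he : c = 'e'
        · subst he; simp
        · by_cases hn : c = 'n'
          · subst hn; simp
          · have h1 : (c == 'w' || c == 'e') = false := by simp [hw, he]
            have h2 : (c == 'n' || c == 's') = false := by simp [hn, hs]
            simp [hw, hs, he, hn, h1, h2]

-- ===== VERDICT (by name: the statement is the Claim_ definition above) =====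
theorem calc_bbox_spec : Claim_equal_calc_bbox := by
  intro ab eb st _
  unfold Spec_calc_bbox
  cases st with
  | none => rfl
  | some s =>
    simp only [calc_bbox, calc_bbox_alt]
    rw [fold_axes]
    cases hx : List.find? (fun c => c == 'w' || c == 'e') s.toList.reverse with
    | none =>
      cases hy : List.find? (fun c => c == 'n' || c == 's') s.toList.reverse with
      | none => simp
      | some cy =>
        have h2 := List.find?_some hy
        simp only [beq_iff_eq, Bool.or_eq_true] at h2
        rcases h2 with h | h <;> subst h <;> simp
    | some cx =>
      have h1 := List.find?_some hx
      simp only [beq_iff_eq, Bool.or_eq_true] at h1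
      cases hy : List.find? (fun c => c == 'n' || c == 's') s.toList.reverse with
      | none => rcases h1 with h | h <;> subst h <;> simp
      | some cy =>
        have h2 := List.find?_some hy
        simp only [beq_iff_eq, Bool.or_eq_true] at h2
        rcases h1 with h | h <;> rcases h2 with h' | h' <;> subst h <;> subst h' <;> simp
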